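-- pv_equiv track=rewrite | github.com/Pranav63/SelfDrivingCar | searchUtils.py | insertStateInPriorityQueue
-- ===== SOURCE A (Python) =====
-- def insertStateInPriorityQueue(searchList,state,distanceToGoal):
--     index = -1
--     for i in range(len(searchList)):
--         if(distanceToGoal < searchList[i][1]):
--             index = i
--             break
--
--     if(len(searchList) == 0 or index == -1):
--         searchList.append([state,distanceToGoal])
--     else:
--         searchList.insert(index, [state,distanceToGoal])
--     return searchList
-- ===== SOURCE B (Python) =====
-- def _placed(lst, state, distanceToGoal):
--     if not lst or distanceToGoal < lst[0][1]:
--         return [[state, distanceToGoal]] + lst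
--     return [lst[0]] + _placed(lst[1:], state, distanceToGoal)
--
-- def insertStateInPriorityQueue(searchList, state, distanceToGoal):
--     searchList[:] = _placed(searchList, state, distanceToGoal)
--     return searchList
-- ===== Notes on version B (the rewrite author's own statement) =====
-- stated objective: alternative
-- what changed: Replaces the imperative index scan (sentinel index, range loop with break) followed by an append/insert branch by structural recursion that rebuilds the list: prepend the new [state, distance] entry before the first strictly larger distance, otherwise keep the head and recurse on the tail; the result is written back in place with one slice assignment.
import Mathlib
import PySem

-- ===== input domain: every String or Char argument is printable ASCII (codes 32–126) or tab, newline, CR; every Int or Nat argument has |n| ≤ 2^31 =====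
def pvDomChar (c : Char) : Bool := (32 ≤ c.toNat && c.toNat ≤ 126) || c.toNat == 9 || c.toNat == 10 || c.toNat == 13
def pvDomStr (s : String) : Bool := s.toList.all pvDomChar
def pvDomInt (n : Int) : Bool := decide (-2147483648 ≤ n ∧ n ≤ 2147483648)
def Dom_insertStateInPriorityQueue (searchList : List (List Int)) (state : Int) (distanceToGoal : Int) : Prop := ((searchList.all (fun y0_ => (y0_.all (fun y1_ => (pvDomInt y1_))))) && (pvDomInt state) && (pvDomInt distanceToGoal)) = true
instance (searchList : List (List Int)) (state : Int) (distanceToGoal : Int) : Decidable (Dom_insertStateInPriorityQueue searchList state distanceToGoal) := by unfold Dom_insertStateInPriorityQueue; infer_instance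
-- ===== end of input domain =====

-- B replaces A's sentinel index scan + append/insert branch by a structural recursion that rebuilds
-- the list, prepending the new entry before the first strictly larger distance (alternative, same
-- cost; both A and B mutate searchList in place and return it — equivalence is about return value,
-- and Source B's slice assignment makes the mutation identical too).

-- ===== PORT A =====
-- for i in range(len(searchList)): if distanceToGoal < searchList[i][1]: index = i; break
-- (inner [1] ported as .getD 1 0: exact under Pre_, which guarantees every accessed entry has ≥ 2 elements)
def pvALoop (searchList : List (List Int)) (distanceToGoal : Int) : List Int → Int
  | [] => -1
  | i :: rest =>
      if distanceToGoal < (PySem.List.pyGetD searchList i []).getD 1 0 then i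
      else pvALoop searchList distanceToGoal rest

def insertStateInPriorityQueue (searchList : List (List Int)) (state : Int) (distanceToGoal : Int) : List (List Int) :=
  let index := pvALoop searchList distanceToGoal (PySem.List.pyRange 0 searchList.length 1)
  if searchList.length = 0 ∨ index = -1 then
    searchList ++ [[state, distanceToGoal]]
  else
    PySem.List.insert searchList index [state, distanceToGoal]

-- ===== PORT B =====
-- _placed: if not lst or distanceToGoal < lst[0][1]: return [[state,d]] + lst; else [lst[0]] + _placed(lst[1:],...)
-- (lst[0][1] ported as .getD 1 0: exact under Pre_)
def pvPlaced (state : Int) (distanceToGoal : Int) : List (List Int) → List (List Int)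
  | [] => [[state, distanceToGoal]]
  | e :: rest =>
      if distanceToGoal < e.getD 1 0 then [state, distanceToGoal] :: e :: rest
      else e :: pvPlaced state distanceToGoal rest

def insertStateInPriorityQueue_alt (searchList : List (List Int)) (state : Int) (distanceToGoal : Int) : List (List Int) :=
  pvPlaced state distanceToGoal searchList

-- ===== PRECONDITION & SPEC =====
-- Python A raises IndexError when its scan reaches an entry with fewer than 2 elements before the
-- insertion point is found; Pre_ excludes exactly those inputs (B raises at the same entries).
def Pre_insertStateInPriorityQueue (searchList : List (List Int)) (state : Int) (distanceToGoal : Int) : Prop :=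
  ∀ i ∈ List.range searchList.length,
    (∀ j ∈ List.range i, 2 ≤ (searchList.getD j []).length ∧ (searchList.getD j []).getD 1 0 ≤ distanceToGoal) →
    2 ≤ (searchList.getD i []).length
instance (searchList : List (List Int)) (state : Int) (distanceToGoal : Int) : Decidable (Pre_insertStateInPriorityQueue searchList state distanceToGoal) := by unfold Pre_insertStateInPriorityQueue; infer_instance

def pvWitness_insertStateInPriorityQueue : List (List Int) × Int × Int := ([[7, 1], [8, 4]], 5, 2)

def Spec_insertStateInPriorityQueue (searchList : List (List Int)) (state : Int) (distanceToGoal : Int) (out : List (List Int)) : Prop := out = insertStateInPriorityQueue_alt searchList state distanceToGoal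
instance (searchList : List (List Int)) (state : Int) (distanceToGoal : Int) (out : List (List Int)) : Decidable (Spec_insertStateInPriorityQueue searchList state distanceToGoal out) := by unfold Spec_insertStateInPriorityQueue; infer_instance

-- ===== CLAIM (what is proved, stated in full; the proofs are below) =====
def Claim_equal_insertStateInPriorityQueue : Prop := ∀ (searchList : List (List Int)) (state : Int) (distanceToGoal : Int), Dom_insertStateInPriorityQueue searchList state distanceToGoal → Pre_insertStateInPriorityQueue searchList state distanceToGoal → Spec_insertStateInPriorityQueue searchList state distanceToGoal (insertStateInPriorityQueue searchList state distanceToGoal)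

-- ===== LEMMAS AND PROOFS =====

-- first index k with distanceToGoal < (entry k)[1], as a structural recursion (characterises A's scan)
def pvFgt (d : Int) : List (List Int) → Option Nat
  | [] => none
  | e :: rest => if d < e.getD 1 0 then some 0 else (pvFgt d rest).map Nat.succ

theorem pvALoop_range (d : Int) (rest : List (List Int)) :
    ∀ pre : List (List Int),
      pvALoop (pre ++ rest) d (PySem.List.pyRange (pre.length : Int) ((pre ++ rest).length : Int) 1) =
        (pvFgt d rest).elim (-1) (fun k => ((pre.length + k : Nat) : Int)) := by
  induction rest with
  | nil =>
      intro pre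
      rw [PySem.List.pyRange_one_eq_nil (by simp)]
      rfl
  | cons e rest ih =>
      intro pre
      have hlt : (pre.length : Int) < ((pre ++ e :: rest).length : Int) := by
        simp only [List.length_append, List.length_cons]; push_cast; omega
      rw [PySem.List.pyRange_one_cons hlt]
      have hget : (PySem.List.pyGetD (pre ++ e :: rest) (pre.length : Int) []) = e := by
        rw [PySem.List.pyGetD_natCast]
        simp [List.getD]
      simp only [pvALoop, pvFgt, hget]
      by_cases h : d < e.getD 1 0
      · rw [if_pos h, if_pos h]
        simp only [Option.elim_some, Nat.add_zero]
      · rw [if_neg h, if_neg h]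
        have hre : pre ++ e :: rest = (pre ++ [e]) ++ rest := by simp
        have hlen : (pre.length : Int) + 1 = (((pre ++ [e]).length : Nat) : Int) := by
          simp only [List.length_append, List.length_cons, List.length_nil]; push_cast; ring
        rw [hlen, hre, ih (pre ++ [e])]
        cases pvFgt d rest with
        | none => rfl
        | some k =>
            simp only [Option.map_some, Option.elim_some, List.length_append,
              List.length_cons, List.length_nil]
            congr 1
            omega

theorem pvFgt_lt (d : Int) (sl : List (List Int)) (k : Nat) (h : pvFgt d sl = some k) :
    k < sl.length := by
  induction sl generalizing k with
  | nil => simp [pvFgt] at h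
  | cons e rest ih =>
      by_cases hc : d < e.getD 1 0
      · rw [pvFgt, if_pos hc, Option.some.injEq] at h
        simp only [List.length_cons]; omega
      · rw [pvFgt, if_neg hc, Option.map_eq_some_iff] at h
        obtain ⟨k', hk', rfl⟩ := h
        have := ih k' hk'
        simp only [List.length_cons]; omega

theorem pvPlaced_none (st d : Int) (sl : List (List Int)) (h : pvFgt d sl = none) :
    pvPlaced st d sl = sl ++ [[st, d]] := by
  induction sl with
  | nil => rfl
  | cons e rest ih =>
      by_cases hc : d < e.getD 1 0
      · rw [pvFgt, if_pos hc] at h; exact absurd h (by simp)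
      · rw [pvFgt, if_neg hc, Option.map_eq_none_iff] at h
        rw [pvPlaced, if_neg hc, ih h]
        rfl

theorem pvPlaced_some (st d : Int) (sl : List (List Int)) (k : Nat) (h : pvFgt d sl = some k) :
    pvPlaced st d sl = sl.take k ++ [st, d] :: sl.drop k := by
  induction sl generalizing k with
  | nil => simp [pvFgt] at h
  | cons e rest ih =>
      by_cases hc : d < e.getD 1 0
      · rw [pvFgt, if_pos hc, Option.some.injEq] at h
        subst h
        rw [pvPlaced, if_pos hc]
        rfl
      · rw [pvFgt, if_neg hc, Option.map_eq_some_iff] at h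
        obtain ⟨k', hk', rfl⟩ := h
        rw [pvPlaced, if_neg hc, ih k' hk']
        rfl

-- ===== VERDICT (by name: the statement is the Claim_ definition above) =====
theorem insertStateInPriorityQueue_spec : Claim_equal_insertStateInPriorityQueue := by
  intro sl st d _ _
  unfold Spec_insertStateInPriorityQueue insertStateInPriorityQueue insertStateInPriorityQueue_alt
  have hA := pvALoop_range d sl []
  simp only [List.nil_append, List.length_nil, Nat.cast_zero, Nat.zero_add] at hA
  rw [hA]
  cases hf : pvFgt d sl with
  | none =>
      simp only [Option.elim_none]
      rw [if_pos (Or.inr trivial), pvPlaced_none st d sl hf]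
  | some k =>
      have hk := pvFgt_lt d sl k hf
      simp only [Option.elim_some]
      rw [if_neg (by rw [not_or]; constructor <;> omega),
        PySem.List.insert_natCast sl k [st, d] (by omega),
        pvPlaced_some st d sl k hf]
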